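-- pv_equiv track=rewrite | github.com/RutujaGharat-11/Smart-Dispatch | scheduler/os_engine.py | _greedy_assign
-- ===== SOURCE A (Python) =====
-- def _normalize_text(value):
--     return str(value or "").strip().lower()
--
-- def normalize_resource_type(resource_type):
--     """Convert legacy resource labels into canonical scheduler resource types."""
--     resource = _normalize_text(resource_type).replace("-", "_").replace(" ", "_")
--
--     if "ambulance" in resource or "medical" in resource:
--         return "ambulance"
--     if "fire" in resource:
--         return "fire_service"
--     if "police" in resource:
--         return "police"
--     if "agriculture" in resource:
--         return "agriculture_officer"
--     if "garbage" in resource: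
--         return "garbage_truck"
--
--     return resource or "agriculture_officer"
--
-- def _resource_matches_complaint(complaint_type, resource_type):
--     complaint = normalize_resource_type(complaint_type)
--     resource = normalize_resource_type(resource_type)
--
--     mapping = {
--         "garbage_truck": {"garbage_truck"},
--         "water_tanker": {"water_tanker"},
--         "ambulance": {"ambulance"},
--         "fire_service": {"fire_service"},
--         "police": {"police"},
--         "agriculture_officer": {"agriculture_officer"},
--     }
--
--     for complaint_key, allowed_resources in mapping.items():
--         if complaint == complaint_key:
--             return resource in allowed_resources
--
--     return False
--
-- def _greedy_assign(requests, free_resources):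
--     available_resources = list(free_resources)
--     assignments = []
--
--     for request_obj in requests:
--         request_id = request_obj.get("id")
--         if request_id is None:
--             continue
--
--         complaint_type = request_obj.get("complaint_type") or request_obj.get("type")
--         match_index = None
--
--         for idx, resource_obj in enumerate(available_resources):
--             if _resource_matches_complaint(complaint_type, resource_obj.get("resource_type") or resource_obj.get("type")):
--                 match_index = idx
--                 break
--
--         if match_index is None:
--             continue
--
--         matched_resource = available_resources.pop(match_index)
--         resource_id = matched_resource.get("id")
--         if resource_id is None:
--             continue
--
--         assignments.append({"request_id": request_id, "resource_id": resource_id})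
--
--     return assignments
-- ===== SOURCE B (Python) =====
-- # B: bucket free resources by canonical type once, then serve each request by
-- # advancing a per-type head index over its FIFO bucket (no per-request rescan).
--
-- def _normalize_text(value):
--     return str(value or "").strip().lower()
--
-- def normalize_resource_type(resource_type):
--     resource = _normalize_text(resource_type).replace("-", "_").replace(" ", "_")
--
--     if "ambulance" in resource or "medical" in resource:
--         return "ambulance"
--     if "fire" in resource:
--         return "fire_service"
--     if "police" in resource:
--         return "police"
--     if "agriculture" in resource:
--         return "agriculture_officer"
--     if "garbage" in resource:
--         return "garbage_truck"
--
--     return resource or "agriculture_officer"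
--
-- _ALLOWED = frozenset((
--     "garbage_truck", "water_tanker", "ambulance",
--     "fire_service", "police", "agriculture_officer",
-- ))
--
-- def _greedy_assign(requests, free_resources):
--     buckets = {}
--     for resource_obj in free_resources:
--         key = normalize_resource_type(resource_obj.get("resource_type") or resource_obj.get("type"))
--         if key in _ALLOWED:
--             buckets.setdefault(key, []).append(resource_obj)
--
--     heads = {}
--     assignments = []
--     for request_obj in requests:
--         request_id = request_obj.get("id")
--         if request_id is None:
--             continue
--
--         key = normalize_resource_type(request_obj.get("complaint_type") or request_obj.get("type"))
--         queue = buckets.get(key)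
--         if queue is None:
--             continue
--         i = heads.get(key, 0)
--         if i >= len(queue):
--             continue
--         heads[key] = i + 1
--
--         resource_id = queue[i].get("id")
--         if resource_id is None:
--             continue
--         assignments.append({"request_id": request_id, "resource_id": resource_id})
--
--     return assignments
-- ===== Notes on version B (the rewrite author's own statement) =====
-- stated objective: alternative
-- what changed: Instead of rescanning the remaining resource list for every request, B buckets the free resources by canonical type once and serves each request by advancing a per-type head index over its FIFO bucket.
import Mathlib
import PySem

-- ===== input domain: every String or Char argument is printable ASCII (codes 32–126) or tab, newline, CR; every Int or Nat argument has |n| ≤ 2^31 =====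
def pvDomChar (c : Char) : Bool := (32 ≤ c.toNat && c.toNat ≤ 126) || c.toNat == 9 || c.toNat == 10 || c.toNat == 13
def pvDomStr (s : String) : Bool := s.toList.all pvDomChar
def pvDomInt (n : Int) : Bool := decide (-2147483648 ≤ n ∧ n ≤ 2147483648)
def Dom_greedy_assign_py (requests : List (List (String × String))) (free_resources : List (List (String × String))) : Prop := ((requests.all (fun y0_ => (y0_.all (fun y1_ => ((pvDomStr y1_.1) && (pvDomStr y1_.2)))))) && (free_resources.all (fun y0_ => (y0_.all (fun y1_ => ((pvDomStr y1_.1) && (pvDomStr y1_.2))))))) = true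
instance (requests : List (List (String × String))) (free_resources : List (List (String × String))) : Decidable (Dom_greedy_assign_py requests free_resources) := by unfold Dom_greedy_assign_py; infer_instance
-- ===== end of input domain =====

-- B buckets the free resources by canonical type once and serves each request by
-- advancing a per-type head index over its FIFO bucket, instead of A's per-request rescan.

-- ===== PORT A =====
-- shared module helpers (dict.get, `x or y` on strings/None, _normalize_text, normalize_resource_type)
def pvGet (obj : List (String × String)) (k : String) : Option String :=
  (PySem.Dict.mk obj).get? k

-- Python `a or b` where a : Optional[str] (None and "" are falsy)
def pvOr (a b : Option String) : Option String :=
  match a with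
  | none => b
  | some s => if s = "" then b else some s

def pvNormText (v : Option String) : String :=
  PySem.Str.lower (PySem.Str.strip (v.getD ""))

def pvNormRT (v : Option String) : String :=
  let r := PySem.Str.replace (PySem.Str.replace (pvNormText v) "-" "_") " " "_"
  if PySem.Str.isIn "ambulance" r || PySem.Str.isIn "medical" r then "ambulance"
  else if PySem.Str.isIn "fire" r then "fire_service"
  else if PySem.Str.isIn "police" r then "police"
  else if PySem.Str.isIn "agriculture" r then "agriculture_officer"
  else if PySem.Str.isIn "garbage" r then "garbage_truck"
  else if r = "" then "agriculture_officer" else r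

def pvRType (r : List (String × String)) : Option String :=
  pvOr (pvGet r "resource_type") (pvGet r "type")

-- _resource_matches_complaint: the mapping loop over the six literal keys, in order
def pvMatches (ct rt : Option String) : Bool :=
  let c := pvNormRT ct
  let r := pvNormRT rt
  if c = "garbage_truck" then r == "garbage_truck"
  else if c = "water_tanker" then r == "water_tanker"
  else if c = "ambulance" then r == "ambulance"
  else if c = "fire_service" then r == "fire_service"
  else if c = "police" then r == "police"
  else if c = "agriculture_officer" then r == "agriculture_officer"
  else false

-- inner `for idx, resource_obj in enumerate(...)` with break
def pvFindMatch (ct : Option String) : List (List (String × String)) → Nat → Option Nat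
  | [], _ => none
  | r :: rs, i => if pvMatches ct (pvRType r) then some i else pvFindMatch ct rs (i + 1)

def pvGoA : List (List (String × String)) → List (List (String × String)) →
    List (List (String × String)) → List (List (String × String))
  | [], _, acc => acc
  | req :: rest, avail, acc =>
    match pvGet req "id" with
    | none => pvGoA rest avail acc
    | some rid =>
      let ct := pvOr (pvGet req "complaint_type") (pvGet req "type")
      match pvFindMatch ct avail 0 with
      | none => pvGoA rest avail acc
      | some idx =>
        match PySem.List.pop? avail (idx : Int) with
        | none => pvGoA rest avail acc   -- unreachable: idx is always in range
        | some (m, avail') =>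
          match pvGet m "id" with
          | none => pvGoA rest avail' acc
          | some resid => pvGoA rest avail' (acc ++ [[("request_id", rid), ("resource_id", resid)]])

def greedy_assign_py (requests : List (List (String × String))) (free_resources : List (List (String × String))) : List (List (String × String)) :=
  pvGoA requests free_resources []

-- ===== PORT B =====
def pvAllowed : List String :=
  ["garbage_truck", "water_tanker", "ambulance", "fire_service", "police", "agriculture_officer"]

def pvRKey (r : List (String × String)) : String := pvNormRT (pvRType r)

def pvCKey (req : List (String × String)) : String :=
  pvNormRT (pvOr (pvGet req "complaint_type") (pvGet req "type"))

-- one build step: buckets.setdefault(key, []).append(resource_obj), only for canonical keys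
def pvBucketStep (d : PySem.Dict String (List (List (String × String))))
    (r : List (String × String)) : PySem.Dict String (List (List (String × String))) :=
  if pvRKey r ∈ pvAllowed then d.modify (pvRKey r) [] (· ++ [r]) else d

def pvBuckets (free_resources : List (List (String × String))) :
    PySem.Dict String (List (List (String × String))) :=
  free_resources.foldl pvBucketStep PySem.Dict.empty

def pvGoB : List (List (String × String)) → PySem.Dict String (List (List (String × String))) →
    PySem.Dict String Nat → List (List (String × String)) → List (List (String × String))
  | [], _, _, acc => acc
  | req :: rest, buckets, heads, acc =>
    match pvGet req "id" with
    | none => pvGoB rest buckets heads acc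
    | some rid =>
      let k := pvCKey req
      match buckets.get? k with
      | none => pvGoB rest buckets heads acc
      | some q =>
        let i := heads.getD k 0
        if hlt : i < q.length then
          let heads' := heads.insert k (i + 1)
          match pvGet q[i] "id" with
          | none => pvGoB rest buckets heads' acc
          | some resid => pvGoB rest buckets heads' (acc ++ [[("request_id", rid), ("resource_id", resid)]])
        else pvGoB rest buckets heads acc

def greedy_assign_py_alt (requests : List (List (String × String))) (free_resources : List (List (String × String))) : List (List (String × String)) :=
  pvGoB requests (pvBuckets free_resources) PySem.Dict.empty []

-- ===== PRECONDITION & SPEC =====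
-- The Lean arguments encode Python dicts as association lists; Pre_ records exactly that encoding
-- for the fields the scheduler reads ("id", "complaint_type", "type", "resource_type"): each is
-- bound at most once per object. Every input expressible as Python dicts satisfies it (A is total),
-- so Pre_ excludes no Python input.
def pvFields : List String := ["id", "complaint_type", "type", "resource_type"]

def Pre_greedy_assign_py (requests : List (List (String × String))) (free_resources : List (List (String × String))) : Prop :=
  ((requests ++ free_resources).all (fun obj =>
    pvFields.all (fun f => decide (obj.countP (fun p => p.1 == f) ≤ 1)))) = true

instance (requests : List (List (String × String))) (free_resources : List (List (String × String))) : Decidable (Pre_greedy_assign_py requests free_resources) := by unfold Pre_greedy_assign_py; infer_instance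

def pvWitness_greedy_assign_py : (List (List (String × String))) × (List (List (String × String))) :=
  ([[("id", "r1"), ("complaint_type", "Ambulance")], [("id", "r2"), ("type", "garbage truck")]],
   [[("id", "a7"), ("resource_type", "medical van")], [("id", "g3"), ("type", "garbage-truck")]])

def Spec_greedy_assign_py (requests : List (List (String × String))) (free_resources : List (List (String × String))) (out : List (List (String × String))) : Prop := out = greedy_assign_py_alt requests free_resources
instance (requests : List (List (String × String))) (free_resources : List (List (String × String))) (out : List (List (String × String))) : Decidable (Spec_greedy_assign_py requests free_resources out) := by unfold Spec_greedy_assign_py; infer_instance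

-- ===== CLAIM (what is proved, stated in full; the proofs are below) =====
def Claim_equal_greedy_assign_py : Prop := ∀ (requests : List (List (String × String))) (free_resources : List (List (String × String))), Dom_greedy_assign_py requests free_resources → Pre_greedy_assign_py requests free_resources → Spec_greedy_assign_py requests free_resources (greedy_assign_py requests free_resources)

-- ===== LEMMAS AND PROOFS =====

-- A's match test = "the complaint key is canonical AND the resource key equals it"
theorem pvMatches_eq (ct rt : Option String) :
    pvMatches ct rt = (decide (pvNormRT ct ∈ pvAllowed) && (pvNormRT rt == pvNormRT ct)) := by
  simp only [pvMatches, pvAllowed]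
  split_ifs with h1 h2 h3 h4 h5 h6 <;> simp_all

theorem pvFindMatch_shift (ct : Option String) (l : List (List (String × String))) :
    ∀ i, pvFindMatch ct l (i + 1) = (pvFindMatch ct l i).map (· + 1) := by
  induction l with
  | nil => intro i; simp [pvFindMatch]
  | cons r rs ih =>
    intro i
    simp only [pvFindMatch]
    by_cases h : pvMatches ct (pvRType r) = true <;> simp [h, ih]

theorem pvFindMatch_none (ct : Option String) (l : List (List (String × String)))
    (h : ∀ r ∈ l, pvMatches ct (pvRType r) = false) : ∀ i, pvFindMatch ct l i = none := by
  induction l with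
  | nil => intro i; simp [pvFindMatch]
  | cons r rs ih =>
    intro i
    simp only [pvFindMatch, h r (by simp)]
    exact ih (fun x hx => h x (by simp [hx])) (i + 1)

-- characterisation of A's scan+pop when the complaint key is canonical
theorem pvScan_spec (ct : Option String) (hck : pvNormRT ct ∈ pvAllowed) :
    ∀ l : List (List (String × String)),
      (l.filter (fun r => pvRKey r == pvNormRT ct) = [] → pvFindMatch ct l 0 = none) ∧
      (∀ x xs, l.filter (fun r => pvRKey r == pvNormRT ct) = x :: xs →
        ∃ n, ∃ hn : n < l.length, pvFindMatch ct l 0 = some n ∧ l[n] = x ∧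
          (∀ k, (l.eraseIdx n).filter (fun r => pvRKey r == k) =
            if k = pvNormRT ct then xs else l.filter (fun r => pvRKey r == k))) := by
  intro l
  induction l with
  | nil => exact ⟨fun _ => rfl, fun x xs h => by simp at h⟩
  | cons r rs ih =>
    have hm : pvMatches ct (pvRType r) = ((pvRKey r == pvNormRT ct)) := by
      rw [pvMatches_eq]; simp [hck, pvRKey]
    by_cases hr : pvRKey r = pvNormRT ct
    · constructor
      · intro h; simp [hr] at h
      · intro x xs h
        refine ⟨0, by simp, ?_, ?_, ?_⟩
        · simp [pvFindMatch, hm, hr]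
        · simp [hr] at h; simpa using h.1
        · intro k
          have hxs : rs.filter (fun r => pvRKey r == pvNormRT ct) = xs := by
            simp [hr] at h; exact h.2
          by_cases hk : k = pvNormRT ct
          · simpa [hk] using hxs
          · have hne : (pvRKey r == k) = false :=
              beq_eq_false_iff_ne.mpr (by rw [hr]; exact fun hc => hk hc.symm)
            simp [List.eraseIdx, hk, hne]
    · have hf : (r :: rs).filter (fun r => pvRKey r == pvNormRT ct)
          = rs.filter (fun r => pvRKey r == pvNormRT ct) := by
        simp [hr]
      have hfmr : pvFindMatch ct (r :: rs) 0 = (pvFindMatch ct rs 0).map (· + 1) := by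
        simp only [pvFindMatch, hm]
        simp [hr, pvFindMatch_shift]
      constructor
      · intro h
        rw [hf] at h
        rw [hfmr, (ih.1 h)]; rfl
      · intro x xs h
        rw [hf] at h
        obtain ⟨n, hn, hfind, hx, hfilt⟩ := ih.2 x xs h
        refine ⟨n + 1, by simpa using Nat.succ_lt_succ hn, ?_, by simpa using hx, ?_⟩
        · rw [hfmr, hfind]; rfl
        · intro k
          have : (r :: rs).eraseIdx (n + 1) = r :: rs.eraseIdx n := rfl
          rw [this]
          by_cases hk : k = pvNormRT ct
          · have : (pvRKey r == k) = false := by simp [hk, hr]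
            simp only [List.filter_cons, this]
            simpa [hk] using hfilt k
          · have := hfilt k
            simp only [List.filter_cons]
            by_cases hrk : (pvRKey r == k) = true <;> simp_all
    
-- the bucket build: contents of each bucket = the type-filter of the resource list
theorem pvBuckets_getD :
    ∀ (l : List (List (String × String))) d k,
      ((l.foldl pvBucketStep d).getD k []) =
      d.getD k [] ++ (if k ∈ pvAllowed then l.filter (fun r => pvRKey r == k) else []) := by
  intro l
  induction l with
  | nil => intro d k; simp
  | cons r rs ih =>
    intro d k
    simp only [List.foldl_cons]
    by_cases hra : pvRKey r ∈ pvAllowed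
    · rw [ih]
      simp only [pvBucketStep]
      rw [if_pos hra]
      by_cases hk : k = pvRKey r
      · rw [hk]
        simp [PySem.Dict.getD_modify_self, hra, List.append_assoc]
      · have hne : (pvRKey r == k) = false := by simp; intro hc; exact hk hc.symm
        rw [PySem.Dict.getD_modify_of_ne _ _ _ (fun hc => hk hc)]
        simp [hne]
    · rw [ih]
      simp only [pvBucketStep]
      rw [if_neg hra]
      by_cases hk : k ∈ pvAllowed
      · have hne : (pvRKey r == k) = false := by
          simp; intro hc; exact hra (hc ▸ hk)
        simp [hk, hne]
      · simp [hk]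

-- the loop invariant: unread part of bucket k = type-k filter of A's remaining list
theorem pvGo_eq (reqs : List (List (String × String))) :
    ∀ (avail : List (List (String × String)))
      (buckets : PySem.Dict String (List (List (String × String))))
      (heads : PySem.Dict String Nat) (acc : List (List (String × String))),
      (∀ k, (buckets.getD k []).drop (heads.getD k 0) =
        if k ∈ pvAllowed then avail.filter (fun r => pvRKey r == k) else []) →
      pvGoA reqs avail acc = pvGoB reqs buckets heads acc := by
  induction reqs with
  | nil => intro _ _ _ _ _; rfl
  | cons req rest ih =>
    intro avail buckets heads acc hinv
    simp only [pvGoA, pvGoB]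
    cases hid : pvGet req "id" with
    | none => exact ih avail buckets heads acc hinv
    | some rid =>
      set ct := pvOr (pvGet req "complaint_type") (pvGet req "type") with hct
      have hkey : pvCKey req = pvNormRT ct := rfl
      rw [hkey]
      by_cases hck : pvNormRT ct ∈ pvAllowed
      · have hqinv := hinv (pvNormRT ct)
        rw [if_pos hck] at hqinv
        cases hfl : avail.filter (fun r => pvRKey r == pvNormRT ct) with
        | nil =>
          -- no matching resource: A's scan fails, B's bucket is exhausted (or absent)
          rw [(pvScan_spec ct hck avail).1 hfl]
          rw [hfl] at hqinv
          cases hbq : buckets.get? (pvNormRT ct) with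
          | none => exact ih avail buckets heads acc hinv
          | some q =>
            have hqd : buckets.getD (pvNormRT ct) [] = q := by
              rw [PySem.Dict.getD_eq_get?_getD, hbq]; rfl
            rw [hqd] at hqinv
            have hle : ¬ heads.getD (pvNormRT ct) 0 < q.length := by
              rw [List.drop_eq_nil_iff] at hqinv; omega
            simp only [hle, dite_false]
            exact ih avail buckets heads acc hinv
        | cons x xs =>
          obtain ⟨n, hn, hfind, hx, hfilt⟩ := (pvScan_spec ct hck avail).2 x xs hfl
          have hpop : PySem.List.pop? avail ((n : Nat) : Int) = some (avail[n], avail.eraseIdx n) :=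
            PySem.List.pop?_natCast avail n hn
          simp only [hfind, hpop]
          rw [hfl] at hqinv
          -- B side: the bucket for this key holds x at its head position
          cases hbq : buckets.get? (pvNormRT ct) with
          | none =>
            exfalso
            have hqd : buckets.getD (pvNormRT ct) [] = ([] : List (List (String × String))) := by
              rw [PySem.Dict.getD_eq_get?_getD, hbq]; rfl
            rw [hqd] at hqinv
            simp at hqinv
          | some q =>
            have hqd : buckets.getD (pvNormRT ct) [] = q := by
              rw [PySem.Dict.getD_eq_get?_getD, hbq]; rfl
            rw [hqd] at hqinv
            have hilt : heads.getD (pvNormRT ct) 0 < q.length := by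
              have := congrArg List.length hqinv
              simp [List.length_drop] at this; omega
            simp only [hilt, dite_true]
            have hqget : q[heads.getD (pvNormRT ct) 0] = x ∧
                q.drop (heads.getD (pvNormRT ct) 0 + 1) = xs := by
              have hdec := List.drop_eq_getElem_cons hilt
              rw [hdec] at hqinv
              exact ⟨by injection hqinv, by injection hqinv⟩
            have hinv' : ∀ k, ((buckets.getD k []).drop
                ((heads.insert (pvNormRT ct) (heads.getD (pvNormRT ct) 0 + 1)).getD k 0)) =
                if k ∈ pvAllowed then (avail.eraseIdx n).filter (fun r => pvRKey r == k) else [] := by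
              intro k
              by_cases hk : k = pvNormRT ct
              · rw [hk, PySem.Dict.getD_insert_self, hfilt (pvNormRT ct), if_pos rfl,
                  if_pos hck, hqd]
                exact hqget.2
              · rw [PySem.Dict.getD_insert_of_ne _ _ _ hk, hinv k]
                by_cases hka : k ∈ pvAllowed
                · rw [if_pos hka, if_pos hka, hfilt k, if_neg hk]
                · rw [if_neg hka, if_neg hka]
            rw [hx, ← hqget.1]
            cases pvGet q[heads.getD (pvNormRT ct) 0] "id" with
            | none => exact ih _ _ _ _ hinv'
            | some resid => exact ih _ _ _ _ hinv'
      · -- complaint key not canonical: A matches nothing, B's bucket has no such key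
        have hnone : pvFindMatch ct avail 0 = none := by
          apply pvFindMatch_none
          intro r _
          rw [pvMatches_eq]
          simp [hck]
        rw [hnone]
        have hbinv := hinv (pvNormRT ct)
        rw [if_neg hck] at hbinv
        cases hbq : buckets.get? (pvNormRT ct) with
        | none => exact ih avail buckets heads acc hinv
        | some q =>
          have hqd : buckets.getD (pvNormRT ct) [] = q := by
            rw [PySem.Dict.getD_eq_get?_getD, hbq]; rfl
          rw [hqd] at hbinv
          have hle : ¬ heads.getD (pvNormRT ct) 0 < q.length := by
            rw [List.drop_eq_nil_iff] at hbinv; omega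
          simp only [hle, dite_false]
          exact ih avail buckets heads acc hinv

-- ===== VERDICT (by name: the statement is the Claim_ definition above) =====
theorem greedy_assign_py_spec : Claim_equal_greedy_assign_py := by
  intro requests free_resources _ _
  unfold Spec_greedy_assign_py greedy_assign_py greedy_assign_py_alt
  apply pvGo_eq
  intro k
  simp only [pvBuckets]
  rw [pvBuckets_getD free_resources PySem.Dict.empty k]
  simp
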